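-- pv_equiv track=rewrite | github.com/BrunoGarcilazo/Teoria-de-la-Computacion-y-Sistemas-Formales-2020 | Proyecto-2/script.py | obtenerTiempoLibre
-- ===== SOURCE A (Python) =====
-- def obtenerTiempoLibre(horas,dia): #Busca tiempo libre de X horas y devuelve el indice del dia donde empieza ese tiempo libre, sino devuelve -1
--     aux = 0
--     for i in range(0,14,1):
--         if(dia[i]==-1):
--             aux+=1
--             if(aux==horas):
--                 return i - (horas-1)
--         else:
--             aux = 0
--     return -1
-- ===== SOURCE B (Python) =====
-- def obtenerTiempoLibre(horas, dia):
--     for i in range(14):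
--         j = i
--         while j < 14 and dia[j] == -1:
--             j += 1
--             if j - i == horas:
--                 return i
--     return -1
-- ===== Notes on version B (the rewrite author's own statement) =====
-- stated objective: alternative
-- what changed: Replaced A's single pass with a running counter by a nested scan: an outer loop over candidate start positions and an inner count-and-compare walk over consecutive free slots.
import Mathlib
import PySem

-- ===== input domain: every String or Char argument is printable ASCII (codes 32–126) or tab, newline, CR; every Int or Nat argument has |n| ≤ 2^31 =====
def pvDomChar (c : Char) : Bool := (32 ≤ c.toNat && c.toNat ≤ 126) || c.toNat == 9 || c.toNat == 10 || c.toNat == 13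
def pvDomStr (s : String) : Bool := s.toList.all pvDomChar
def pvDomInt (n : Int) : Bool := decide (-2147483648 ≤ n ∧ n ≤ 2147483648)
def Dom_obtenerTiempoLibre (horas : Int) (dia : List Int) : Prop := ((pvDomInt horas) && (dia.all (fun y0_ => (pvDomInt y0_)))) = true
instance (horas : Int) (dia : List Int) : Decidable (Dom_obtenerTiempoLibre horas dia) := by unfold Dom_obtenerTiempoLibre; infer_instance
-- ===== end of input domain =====

-- B replaces A's one-pass running counter by an outer scan over start positions with an
-- inner count-and-compare walk (alternative decomposition, same return value).

-- ===== PORT A =====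
-- loop 'for i in range(0,14,1)' with running counter aux; the 'none' branch is the
-- IndexError case of dia[i], excluded by Pre_ (value there is irrelevant).
def obtenerTiempoLibreA (horas : Int) (dia : List Int) : List Int → Int → Int
  | [], _ => -1
  | i :: rest, aux =>
    match PySem.List.pyGet? dia i with
    | none => 0
    | some v =>
      if v = -1 then
        if aux + 1 = horas then i - (horas - 1) else obtenerTiempoLibreA horas dia rest (aux + 1)
      else obtenerTiempoLibreA horas dia rest 0

def obtenerTiempoLibre (horas : Int) (dia : List Int) : Int :=
  obtenerTiempoLibreA horas dia (PySem.List.pyRange 0 14 1) 0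

-- ===== PORT B =====
-- inner 'while j < 14 and dia[j] == -1' loop of B; 'some i' = the 'return i' inside it.
-- The pyGet?-none (IndexError) case is folded into the stop branch; excluded by Pre_.
def obtenerTiempoLibreB (horas : Int) (dia : List Int) (i : Int) (j : Int) : Option Int :=
  if h : j < 14 ∧ PySem.List.pyGet? dia j = some (-1) then
    if (j + 1) - i = horas then some i else obtenerTiempoLibreB horas dia i (j + 1)
  else none
termination_by (14 - j).toNat
decreasing_by omega

-- outer 'for i in range(14)' loop of B
def obtenerTiempoLibreBOuter (horas : Int) (dia : List Int) : List Int → Int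
  | [] => -1
  | i :: rest =>
    match obtenerTiempoLibreB horas dia i i with
    | some r => r
    | none => obtenerTiempoLibreBOuter horas dia rest

def obtenerTiempoLibre_alt (horas : Int) (dia : List Int) : Int :=
  obtenerTiempoLibreBOuter horas dia (PySem.List.pyRange 0 14 1)

-- ===== PRECONDITION & SPEC =====
-- Pre_: either the day has the full 14 slots both loops index, or (on a shorter list)
-- it contains a complete free window of horas hours, so both scans return before
-- running off the end; on the remaining short lists both implementations raise IndexError.
def Pre_obtenerTiempoLibre (horas : Int) (dia : List Int) : Prop :=
  14 ≤ dia.length ∨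
    (1 ≤ horas ∧ ∃ w : Nat, w < dia.length ∧ (w : Int) + horas ≤ dia.length ∧
      ∀ k : Nat, k < horas.toNat → PySem.List.pyGet? dia ((w : Int) + (k : Int)) = some (-1))
instance (horas : Int) (dia : List Int) : Decidable (Pre_obtenerTiempoLibre horas dia) := by
  unfold Pre_obtenerTiempoLibre; infer_instance

def pvWitness_obtenerTiempoLibre : Int × List Int :=
  (2, [0, -1, 0, -1, -1, 0, 0, 0, -1, -1, -1, 0, 0, 0])

def Spec_obtenerTiempoLibre (horas : Int) (dia : List Int) (out : Int) : Prop := out = obtenerTiempoLibre_alt horas dia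
instance (horas : Int) (dia : List Int) (out : Int) : Decidable (Spec_obtenerTiempoLibre horas dia out) := by unfold Spec_obtenerTiempoLibre; infer_instance

-- ===== CLAIM (what is proved, stated in full; the proofs are below) =====
def Claim_equal_obtenerTiempoLibre : Prop := ∀ (horas : Int) (dia : List Int), Dom_obtenerTiempoLibre horas dia → Pre_obtenerTiempoLibre horas dia → Spec_obtenerTiempoLibre horas dia (obtenerTiempoLibre horas dia)

-- ===== LEMMAS AND PROOFS =====

-- index lists [s, s+1, …, s+n-1], the suffixes of range(14) the proofs recurse over
def pvIds (s : Int) : Nat → List Int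
  | 0 => []
  | n + 1 => s :: pvIds (s + 1) n

theorem pvIds_range : PySem.List.pyRange 0 14 1 = pvIds 0 14 := by decide

-- every index in pvIds s n with 0 ≤ s, s+n ≤ 14 hits a real element under Pre_
theorem pvGet_some (dia : List Int) (hlen : 14 ≤ dia.length) (i : Int)
    (h0 : 0 ≤ i) (h14 : i < 14) : ∃ v, PySem.List.pyGet? dia i = some v := by
  have hr : PySem.Raise.InRange dia.length i := by
    constructor <;> omega
  cases h : PySem.List.pyGet? dia i with
  | some v => exact ⟨v, rfl⟩
  | none =>
    exact absurd hr ((PySem.List.pyGet?_eq_none_iff dia i).mp h)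

-- B's inner loop never fires for nonpositive horas (j+1-i ≥ 1 > horas throughout)
theorem bInner_nonpos (horas : Int) (dia : List Int) (hh : horas ≤ 0)
    (i : Int) : ∀ n (j : Int), (14 - j).toNat = n → i ≤ j →
    obtenerTiempoLibreB horas dia i j = none := by
  intro n
  induction n with
  | zero =>
    intro j hj hij
    rw [obtenerTiempoLibreB]
    split
    · next h => omega
    · rfl
  | succ n ih =>
    intro j hj hij
    rw [obtenerTiempoLibreB]
    split
    · next h =>
      have : ¬ ((j + 1) - i = horas) := by omega
      rw [if_neg this]
      exact ih (j + 1) (by omega) (by omega)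
    · rfl

-- B's inner loop returns none when the free run from j stops at t with t - i < horas
theorem bInner_blocked (horas : Int) (dia : List Int) (i t : Int)
    (hti : t - i < horas) (ht14 : t ≤ 14)
    (hstop : t < 14 → ¬ PySem.List.pyGet? dia t = some (-1)) :
    ∀ n (j : Int), (t - j).toNat = n → i ≤ j → j ≤ t →
    (∀ k : Int, j ≤ k → k < t → PySem.List.pyGet? dia k = some (-1)) →
    obtenerTiempoLibreB horas dia i j = none := by
  intro n
  induction n with
  | zero =>
    intro j hj hij hjt hfree
    have hjt' : j = t := by omega
    subst hjt'
    rw [obtenerTiempoLibreB]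
    split
    · next h => exact absurd h.2 (hstop h.1)
    · rfl
  | succ n ih =>
    intro j hj hij hjt hfree
    have hjlt : j < t := by omega
    rw [obtenerTiempoLibreB]
    split
    · next h =>
      have : ¬ ((j + 1) - i = horas) := by omega
      rw [if_neg this]
      exact ih (j + 1) (by omega) (by omega) (by omega)
        (fun k hk1 hk2 => hfree k (by omega) hk2)
    · rfl

-- B's inner loop returns some i when a full free window [i, i+horas) lies ahead
theorem bInner_some (horas : Int) (dia : List Int) (i : Int)
    (hwin : i + horas ≤ 14)
    (hfree : ∀ k : Int, i ≤ k → k < i + horas → PySem.List.pyGet? dia k = some (-1)) :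
    ∀ n (j : Int), (i + horas - j).toNat = n → i ≤ j → j < i + horas →
    obtenerTiempoLibreB horas dia i j = some i := by
  intro n
  induction n with
  | zero => intro j hj hij hjw; omega
  | succ n ih =>
    intro j hj hij hjw
    rw [obtenerTiempoLibreB]
    rw [dif_pos ⟨by omega, hfree j hij hjw⟩]
    by_cases hc : (j + 1) - i = horas
    · rw [if_pos hc]
    · rw [if_neg hc]
      exact ih (j + 1) (by omega) (by omega) (by omega)

-- B's outer loop returns -1 for nonpositive horas
theorem bOuter_nonpos (horas : Int) (dia : List Int) (hh : horas ≤ 0) :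
    ∀ (n : Nat) (s : Int), obtenerTiempoLibreBOuter horas dia (pvIds s n) = -1 := by
  intro n
  induction n with
  | zero => intro s; rfl
  | succ n ih =>
    intro s
    show obtenerTiempoLibreBOuter horas dia (s :: pvIds (s + 1) n) = -1
    rw [obtenerTiempoLibreBOuter]
    rw [bInner_nonpos horas dia hh s (14 - s).toNat s rfl le_rfl]
    exact ih (s + 1)

-- A returns -1 for nonpositive horas (aux never reaches horas from a nonnegative start)
theorem aGo_nonpos (horas : Int) (dia : List Int) (hlen : 14 ≤ dia.length)
    (hh : horas ≤ 0) :
    ∀ (n : Nat) (s aux : Int), s + (n : Int) = 14 → 0 ≤ s → 0 ≤ aux →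
    obtenerTiempoLibreA horas dia (pvIds s n) aux = -1 := by
  intro n
  induction n with
  | zero => intro s aux _ _ _; rfl
  | succ n ih =>
    intro s aux hsn hs haux
    show obtenerTiempoLibreA horas dia (s :: pvIds (s + 1) n) aux = -1
    obtain ⟨v, hv⟩ := pvGet_some dia hlen s hs (by omega)
    rw [obtenerTiempoLibreA]; rw [hv]; simp only
    by_cases hvm : v = -1
    · rw [if_pos hvm, if_neg (by omega)]
      exact ih (s + 1) (aux + 1) (by omega) (by omega) (by omega)
    · rw [if_neg hvm]
      exact ih (s + 1) 0 (by omega) (by omega) (by omega)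

-- skipping the a+1 doomed starts s-a, …, s when dia[s] is busy
theorem bOuter_skip (horas : Int) (dia : List Int) (s : Int) (hs14 : s < 14)
    (hstop : ¬ PySem.List.pyGet? dia s = some (-1)) :
    ∀ (m : Nat) (n : Nat), (m : Int) ≤ horas →
    (∀ k : Int, s - m < k → k < s → PySem.List.pyGet? dia k = some (-1)) →
    obtenerTiempoLibreBOuter horas dia (pvIds (s + 1 - m) (n + m)) =
      obtenerTiempoLibreBOuter horas dia (pvIds (s + 1) n) := by
  intro m
  induction m with
  | zero => intro n _ _; norm_num
  | succ m ih =>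
    intro n hmh hfree
    have : pvIds (s + 1 - (m + 1 : Nat)) (n + (m + 1)) =
        (s - (m : Int)) :: pvIds (s + 1 - (m : Nat)) (n + m) := by
      show pvIds (s + 1 - ((m : Int) + 1)) (n + m + 1) = _
      rw [pvIds]
      congr 1 <;> push_cast <;> ring_nf
    rw [this, obtenerTiempoLibreBOuter]
    rw [bInner_blocked horas dia (s - (m : Int)) s (by omega)
      (by omega) (fun _ => hstop) (s - (s - (m : Int))).toNat (s - (m : Int)) rfl
      le_rfl (by omega) (fun k hk1 hk2 => hfree k (by push_cast; omega) hk2)]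
    exact ih n (by push_cast at hmh ⊢; omega)
      (fun k hk1 hk2 => hfree k (by push_cast at hk1 ⊢; omega) hk2)

-- main invariant: A from position s with a pending free run of length a equals
-- B restarted from position s - a (the run's start), for 1 ≤ horas
theorem pvMain (horas : Int) (dia : List Int) (hh : 1 ≤ horas) :
    ∀ (n : Nat) (s : Int) (a : Nat), s + (n : Int) = 14 → (a : Int) ≤ s → (a : Int) < horas →
    (∀ k : Int, s - a ≤ k → k < s → PySem.List.pyGet? dia k = some (-1)) →
    (14 ≤ (dia.length : Int) ∨ ∃ w : Int, s - a ≤ w ∧ w + horas ≤ (dia.length : Int) ∧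
      ∀ k : Int, w ≤ k → k < w + horas → PySem.List.pyGet? dia k = some (-1)) →
    obtenerTiempoLibreA horas dia (pvIds s n) a =
      obtenerTiempoLibreBOuter horas dia (pvIds (s - a) (n + a)) := by
  intro n
  induction n with
  | zero =>
    intro s a hsn has hah hfree _
    show (-1 : Int) = _
    have hs : s = 14 := by omega
    subst hs
    -- all remaining starts 14-a .. 13 are blocked at t = 14 with run < horas
    have : ∀ (m : Nat), (m : Int) ≤ (a : Int) →
        obtenerTiempoLibreBOuter horas dia (pvIds (14 - m) m) = -1 := by
      intro m
      induction m with
      | zero => intro _; rfl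
      | succ m ihm =>
        intro hma
        have : pvIds (14 - (m + 1 : Nat)) (m + 1) =
            (14 - ((m : Int) + 1)) :: pvIds (14 - (m : Nat)) m := by
          rw [pvIds]
          congr 1 <;> push_cast <;> ring_nf
        rw [this, obtenerTiempoLibreBOuter]
        rw [bInner_blocked horas dia (14 - ((m : Int) + 1)) 14
          (by push_cast at hma ⊢; omega) le_rfl (by omega)
          ((14 : Int) - (14 - ((m : Int) + 1))).toNat (14 - ((m : Int) + 1)) rfl
          le_rfl (by omega)
          (fun k hk1 hk2 => hfree k (by push_cast at hma ⊢; omega) (by omega))]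
        exact ihm (by push_cast at hma ⊢; omega)
    rw [show (0 + a : Nat) = a by omega]
    exact (this a le_rfl).symm
  | succ n ih =>
    intro s a hsn has hah hfree hH
    cases hvv : PySem.List.pyGet? dia s with
    | none =>
      -- impossible under hH: the scan would run off the end before the promised return
      exfalso
      have hnr := (PySem.List.pyGet?_eq_none_iff dia s).mp hvv
      have hlen : (dia.length : Int) ≤ s := by
        by_contra hcon
        exact hnr ⟨by omega, by omega⟩
      rcases hH with hl | ⟨w, hw1, hw2, _⟩
      · omega
      · omega
    | some v =>
      have hv : PySem.List.pyGet? dia s = some v := hvv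
      show obtenerTiempoLibreA horas dia (s :: pvIds (s + 1) n) a = _
      rw [obtenerTiempoLibreA]; rw [hv]; simp only
      by_cases hvm : v = -1
      · rw [if_pos hvm]
        by_cases hc : (a : Int) + 1 = horas
        · rw [if_pos hc]
          -- B's first start s - a succeeds via a full free window
          have hids : pvIds (s - a) (n + 1 + a) = (s - (a : Int)) :: pvIds (s - a + 1) (n + a) := by
            rw [show (n + 1 + a) = (n + a) + 1 by omega, pvIds]
          rw [hids, obtenerTiempoLibreBOuter]
          have hwin : ∀ k : Int, s - a ≤ k → k < (s - a) + horas →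
              PySem.List.pyGet? dia k = some (-1) := by
            intro k hk1 hk2
            by_cases hks : k < s
            · exact hfree k hk1 hks
            · have : k = s := by omega
              subst this; rw [hv, hvm]
          rw [bInner_some horas dia (s - a) (by omega) hwin
            ((s - a) + horas - (s - a)).toNat (s - a) rfl le_rfl (by omega)]
          show s - (horas - 1) = s - (a : Int)
          omega
        · rw [if_neg hc]
          have := ih (s + 1) (a + 1) (by push_cast at hsn ⊢; omega) (by push_cast; omega)
            (by push_cast; omega)
            (by
              intro k hk1 hk2
              by_cases hks : k < s
              · exact hfree k (by push_cast at hk1 ⊢; omega) hks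
              · have : k = s := by omega
                subst this; rw [hv, hvm])
            (by
              rcases hH with hl | ⟨w, hw1, hw2, hw3⟩
              · exact Or.inl hl
              · exact Or.inr ⟨w, by push_cast; omega, hw2, hw3⟩)
          rw [show ((a : Int) + 1) = ((a + 1 : Nat) : Int) by push_cast; ring,
            show s - (a : Int) = s + 1 - ((a + 1 : Nat) : Int) by push_cast; ring,
            show n + 1 + a = n + (a + 1) by omega]
          exact this
      · rw [if_neg hvm]
        have hskip := bOuter_skip horas dia s (by omega) (by rw [hv]; simp [hvm]) (a + 1) n
          (by push_cast; omega)
          (fun k hk1 hk2 => hfree k (by push_cast at hk1 ⊢; omega) hk2)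
        have := ih (s + 1) 0 (by push_cast at hsn ⊢; omega) (by omega) (by omega)
          (by intro k hk1 hk2; exact absurd hk2 (by omega))
          (by
            rcases hH with hl | ⟨w, hw1, hw2, hw3⟩
            · exact Or.inl hl
            · refine Or.inr ⟨w, ?_, hw2, hw3⟩
              -- the window cannot start at or before the busy slot s
              by_contra hcon
              have hsw : w ≤ s ∧ s < w + horas := by omega
              have := hw3 s hsw.1 hsw.2
              rw [hv] at this
              exact hvm (by injection this)
          )
        norm_num at this
        rw [this]
        rw [show pvIds (s - a) (n + 1 + a) = pvIds (s + 1 - (a + 1 : Nat)) (n + (a + 1)) by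
          congr 1 <;> push_cast <;> [ring; omega]]
        rw [hskip]

-- ===== VERDICT (by name: the statement is the Claim_ definition above) =====
theorem obtenerTiempoLibre_spec : Claim_equal_obtenerTiempoLibre := by
  intro horas dia _ hpre
  unfold Spec_obtenerTiempoLibre obtenerTiempoLibre obtenerTiempoLibre_alt
  rw [pvIds_range]
  by_cases hh : 1 ≤ horas
  · have hH : 14 ≤ (dia.length : Int) ∨ ∃ w : Int, (0 : Int) - (0 : Nat) ≤ w ∧
        w + horas ≤ (dia.length : Int) ∧
        ∀ k : Int, w ≤ k → k < w + horas → PySem.List.pyGet? dia k = some (-1) := by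
      rcases hpre with hlen | ⟨_, w, hw1, hw2, hw3⟩
      · exact Or.inl (by exact_mod_cast hlen)
      · refine Or.inr ⟨(w : Int), by push_cast; omega, hw2, ?_⟩
        intro k hk1 hk2
        have hidx : (w : Int) + (((k - w).toNat : Nat) : Int) = k := by omega
        have := hw3 (k - w).toNat (by omega)
        rw [hidx] at this
        exact this
    have := pvMain horas dia hh 14 0 0 (by omega) (by omega) (by omega) (by omega) hH
    simpa using this
  · have hlen : 14 ≤ dia.length := by
      rcases hpre with hlen | ⟨h1, _⟩
      · exact hlen
      · omega
    rw [aGo_nonpos horas dia hlen (by omega) 14 0 0 (by omega) le_rfl le_rfl]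
    rw [bOuter_nonpos horas dia (by omega) 14 0]
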